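-- pv_equiv track=rewrite | github.com/ynyeh0221/Codewars | 5-kyu/Ookkk, Ok, O? Ook, Ok, Ooo!.py | okkOokOo
-- ===== SOURCE A (Python) =====
-- def okkOokOo(s):
--     if s[-1] == '!':
--         s = s[ : -1]
--     s = s.split('?');
--     res = '';
--     for i in s:
--         ascii = 0
--         for j in i.lower():
--             if j == 'k':
--                 ascii = 2 * ascii + 1
--             if j == 'o':
--                 ascii *= 2
--         res += chr(ascii)
--     return res
-- ===== SOURCE B (Python) =====
-- def okkOokOo(s):
--     out = []
--     for seg in s.removesuffix('!').split('?'):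
--         bits = ''.join('1' if c == 'k' else '0' for c in seg.lower() if c in 'ko')
--         out.append(chr(int(bits or '0', 2)))
--     return ''.join(out)
-- ===== Notes on version B (the rewrite author's own statement) =====
-- stated objective: idiomatic
-- what changed: A's per-character Horner accumulation (two sequential ifs mutating an int) and string += concatenation are replaced by filtering each segment to a '1'/'0' bit string and parsing it with int(bits or '0', 2), with the result assembled by map/join; the trailing-'!' strip uses removesuffix instead of an s[-1] index.
import Mathlib
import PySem

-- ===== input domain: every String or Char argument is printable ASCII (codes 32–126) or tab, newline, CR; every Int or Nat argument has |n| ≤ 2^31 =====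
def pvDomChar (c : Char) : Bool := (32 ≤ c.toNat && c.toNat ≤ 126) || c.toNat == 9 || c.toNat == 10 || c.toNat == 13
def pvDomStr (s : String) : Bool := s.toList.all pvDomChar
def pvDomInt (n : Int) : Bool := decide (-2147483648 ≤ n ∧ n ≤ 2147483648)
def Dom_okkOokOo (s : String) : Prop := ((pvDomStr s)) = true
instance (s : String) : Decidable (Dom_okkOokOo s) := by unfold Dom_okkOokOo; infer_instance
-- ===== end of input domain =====

-- B replaces A's per-character Horner accumulation and string concatenation by a
-- filter-to-bits + int(bits,2) parse and a map/join (objective: idiomatic; no speed claim).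

-- ===== PORT A =====
-- chr(ascii) is ported by hand as Char.ofNat ascii.toNat: exact for every Unicode scalar
-- value (code point that is not a surrogate and ≤ 0x10FFFF), which Pre_okkOokOo guarantees.
def okkOokOo (s : String) : String :=
  let s := if PySem.Str.pyGet? s (-1) = some '!' then PySem.Str.slice s none (some (-1)) else s
  let segs := (PySem.Str.split? s "?").getD []   -- sep "?" ≠ "" so split? is always some
  let res := segs.foldl (fun res i =>
      let ascii := (PySem.Str.lower i).toList.foldl (fun ascii j =>
          let ascii := if j = 'k' then 2 * ascii + 1 else ascii
          if j = 'o' then ascii * 2 else ascii) (0 : Int)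
      res ++ [Char.ofNat ascii.toNat]) ([] : List Char)
  String.ofList res

-- ===== PORT B =====
-- the generator-expression of Source B: '1' for 'k', '0' for 'o', other chars filtered out
def pvBitsOf (cs : List Char) : List Char :=
  cs.filterMap (fun c => if c = 'k' then some '1' else if c = 'o' then some '0' else none)

-- int(bits, 2) on a string of '0'/'1' digits (Source B only ever parses such strings)
def pvParseBin (cs : List Char) : Int :=
  cs.foldl (fun a c => 2 * a + (if c = '1' then 1 else 0)) 0

def okkOokOo_alt (s : String) : String :=
  -- s.removesuffix('!')
  let t := if PySem.Str.endswith s "!" then PySem.Str.slice s none (some (-1)) else s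
  let segs := (PySem.Str.split? t "?").getD []
  String.ofList ((segs.map (fun seg =>
      let bits := pvBitsOf (PySem.Chars.lower seg.toList)
      Char.ofNat (pvParseBin (if bits = [] then ['0'] else bits)).toNat)))

-- ===== PRECONDITION & SPEC =====
-- the code point a '?'-segment encodes: Horner value of its 'k'/'K' (1) and 'o'/'O' (0) chars
def pvSegVal (seg : String) : Nat :=
  seg.toList.foldl (fun a c =>
    if c = 'k' ∨ c = 'K' then 2 * a + 1 else if c = 'o' ∨ c = 'O' then 2 * a else a) 0

-- Pre_ excludes exactly: the empty string, where A raises IndexError on s[-1]; segments whose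
-- code point exceeds 0x10FFFF, where A's chr raises ValueError; and segments whose code point
-- is a surrogate (0xD800–0xDFFF), where A returns a lone-surrogate string that is not a value
-- of the Lean String type (no Char exists for it).
def Pre_okkOokOo (s : String) : Prop :=
  s ≠ "" ∧ ∀ seg ∈ (PySem.Str.split? s "?").getD [],
    pvSegVal seg < 0xD800 ∨ (0xE000 ≤ pvSegVal seg ∧ pvSegVal seg ≤ 0x10FFFF)
instance (s : String) : Decidable (Pre_okkOokOo s) := by unfold Pre_okkOokOo; infer_instance

def pvWitness_okkOokOo : String := "Ookk? Oo!"

def Spec_okkOokOo (s : String) (out : String) : Prop := out = okkOokOo_alt s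
instance (s : String) (out : String) : Decidable (Spec_okkOokOo s out) := by unfold Spec_okkOokOo; infer_instance

-- ===== CLAIM (what is proved, stated in full; the proofs are below) =====
def Claim_equal_okkOokOo : Prop := ∀ (s : String), Dom_okkOokOo s → Pre_okkOokOo s → Spec_okkOokOo s (okkOokOo s)

-- ===== LEMMAS AND PROOFS =====

-- per segment: A's Horner loop over the lowered chars equals B's filter-then-parse
theorem pvStep_eq (a : Int) (j : Char) :
    (fun ascii j =>
        let ascii := if j = 'k' then 2 * ascii + 1 else ascii
        if j = 'o' then ascii * 2 else ascii) a j
      = if j = 'k' then 2 * a + 1 else if j = 'o' then a * 2 else a := by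
  by_cases hk : j = 'k' <;> by_cases ho : j = 'o' <;> simp_all

theorem pvHorner_eq_parse (cs : List Char) (a : Int) :
    cs.foldl (fun ascii j =>
        let ascii := if j = 'k' then 2 * ascii + 1 else ascii
        if j = 'o' then ascii * 2 else ascii) a
      = (pvBitsOf cs).foldl (fun a c => 2 * a + (if c = '1' then 1 else 0)) a := by
  induction cs generalizing a with
  | nil => rfl
  | cons c cs ih =>
    rw [List.foldl_cons,
        show (let ascii := if c = 'k' then 2 * a + 1 else a
              if c = 'o' then ascii * 2 else ascii)
           = if c = 'k' then 2 * a + 1 else if c = 'o' then a * 2 else a from pvStep_eq a c]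
    by_cases hk : c = 'k'
    · rw [if_pos hk, ih]
      simp [pvBitsOf, hk]
    · by_cases ho : c = 'o'
      · rw [if_neg hk, if_pos ho, ih]
        simp [pvBitsOf, ho]
        ring_nf
      · rw [if_neg hk, if_neg ho, ih]
        simp [pvBitsOf, hk, ho]

theorem pvParse_guard (bits : List Char) :
    pvParseBin (if bits = [] then ['0'] else bits)
      = bits.foldl (fun a c => 2 * a + (if c = '1' then 1 else 0)) 0 := by
  cases bits with
  | nil => simp [pvParseBin]
  | cons b bs => rfl

-- A's string accumulation by += equals B's map
theorem pvFoldl_append_singleton {α β : Type} (g : α → β) (xs : List α) (acc : List β) :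
    xs.foldl (fun r i => r ++ [g i]) acc = acc ++ xs.map g := by
  induction xs generalizing acc with
  | nil => simp
  | cons x xs ih => simp [List.foldl, ih]

-- A's s[-1] == '!' test agrees with B's s.endswith('!')
theorem pvLast_eq_endswith (s : String) :
    (PySem.Str.pyGet? s (-1) = some '!') ↔ PySem.Str.endswith s "!" = true := by
  rw [show PySem.Str.endswith s "!" = PySem.Chars.endswith s.toList ['!'] from rfl,
      PySem.Chars.endswith_iff]
  rw [show PySem.Str.pyGet? s (-1) = PySem.List.pyGet? s.toList (-1) from rfl]
  cases h : s.toList with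
  | nil => simp [PySem.List.pyGet?, PySem.List.pyIdx?, List.IsSuffix]
  | cons c cs =>
    rw [PySem.List.pyGet?_neg_ofNat _ 1 (by omega) (by simp)]
    constructor
    · intro hg
      have hne : (c :: cs) ≠ [] := by simp
      have : (c :: cs).getLast? = some '!' := by
        simpa [List.getLast?_eq_getElem?] using hg
      rcases List.getLast?_eq_some_iff.mp this with ⟨ys, hys⟩
      exact ⟨ys, hys.symm⟩
    · rintro ⟨ys, hys⟩
      have : (c :: cs).getLast? = some '!' := by
        rw [← hys]; simp [List.getLast?_append]
      simpa [List.getLast?_eq_getElem?] using this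

-- ===== VERDICT (by name: the statement is the Claim_ definition above) =====
theorem okkOokOo_spec : Claim_equal_okkOokOo := by
  intro s _ _
  unfold Spec_okkOokOo okkOokOo okkOokOo_alt
  have hcond : (if PySem.Str.pyGet? s (-1) = some '!' then PySem.Str.slice s none (some (-1)) else s)
      = (if PySem.Str.endswith s "!" then PySem.Str.slice s none (some (-1)) else s) := by
    by_cases h : PySem.Str.pyGet? s (-1) = some '!'
    · rw [if_pos h, if_pos ((pvLast_eq_endswith s).mp h)]
    · rw [if_neg h, if_neg (fun he => h ((pvLast_eq_endswith s).mpr he))]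
  rw [hcond]
  refine congrArg String.ofList ?_
  rw [pvFoldl_append_singleton]
  simp only [List.nil_append]
  apply List.map_congr_left
  intro seg _
  have hl : (PySem.Str.lower seg).toList = PySem.Chars.lower seg.toList := by
    simp [PySem.Str.lower]
  rw [hl, pvHorner_eq_parse, pvParse_guard]
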